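-- pv_equiv track=rewrite | github.com/tommo/cpp2nim | cpp2nim/utils.py | get_template_dependencies
-- ===== SOURCE A (Python) =====
-- def clean_type_name(type_name: str) -> str:
--     """Remove const qualifiers and clean a C++ type name.
--
--     Args:
--         type_name: The C++ type name.
--
--     Returns:
--         Cleaned type name.
--
--     Example:
--         >>> clean_type_name("const int &")
--         'int'
--         >>> clean_type_name("const char *")
--         'char'
--     """
--     result = type_name
--     if result.endswith("const *"):
--         result = result[:-7] + "*"
--     if result.startswith("const "):
--         result = result[6:]
--     if result and result[-1] in ["&", "*"]:
--         result = result[:-2] if len(result) > 1 else result[:-1]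
--     return result.strip()
--
-- def get_template_dependencies(type_name: str) -> list[str]:
--     """Extract template parameter dependencies from a type.
--
--     Args:
--         type_name: A C++ type name that may contain template parameters.
--
--     Returns:
--         List of dependent type names extracted from template arguments.
--
--     Example:
--         >>> get_template_dependencies("std::vector<MyClass>")
--         ['std::vector', 'MyClass']
--         >>> get_template_dependencies("std::map<K, V>")
--         ['std::map', 'K', 'V']
--     """
--     result = []
--     cleaned = clean_type_name(type_name)
--
--     # Handle nested templates
--     if '<' in cleaned and cleaned.endswith('>'):
--         # Split into base type and parameters
--         base, params = cleaned.split('<', 1)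
--         params = params[:-1]  # Remove trailing '>'
--
--         # Add base type (e.g., "vector" from "vector<int>")
--         result.append(base.strip())
--
--         # Parse individual parameters
--         depth = 0
--         current_param: list[str] = []
--         for c in params:
--             if c == '<':
--                 depth += 1
--                 current_param.append(c)
--             elif c == '>':
--                 depth -= 1
--                 current_param.append(c)
--             elif c == ',' and depth == 0:
--                 param = ''.join(current_param).strip()
--                 if param:
--                     result.extend(get_template_dependencies(param))
--                 current_param = []
--             else:
--                 current_param.append(c)
--
--         # Add last parameter
--         if current_param:
--             param = ''.join(current_param).strip()
--             if param:
--                 result.extend(get_template_dependencies(param))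
--     else:
--         # Non-template type
--         result.append(cleaned)
--
--     return [r for r in result if r and not r.isdigit()]
-- ===== SOURCE B (Python) =====
-- def clean_type_name(type_name: str) -> str:
--     """Remove const qualifiers and clean a C++ type name (unchanged helper)."""
--     result = type_name
--     if result.endswith("const *"):
--         result = result[:-7] + "*"
--     if result.startswith("const "):
--         result = result[6:]
--     if result and result[-1] in ["&", "*"]:
--         result = result[:-2] if len(result) > 1 else result[:-1]
--     return result.strip()
--
--
-- def get_template_dependencies(type_name: str) -> list[str]:
--     """Iterative worklist version: an explicit stack of sub-types still to
--     process replaces the recursion; the digit/empty filter runs once at the end."""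
--     result = []
--     stack = [type_name]
--     while stack:
--         s = stack.pop()
--         cleaned = clean_type_name(s)
--         if '<' in cleaned and cleaned.endswith('>'):
--             base, params = cleaned.split('<', 1)
--             params = params[:-1]
--             result.append(base.strip())
--             # split params on top-level commas by index slicing
--             parts = []
--             depth = 0
--             start = 0
--             for i, c in enumerate(params):
--                 if c == '<':
--                     depth += 1
--                 elif c == '>':
--                     depth -= 1
--                 elif c == ',' and depth == 0:
--                     parts.append(params[start:i])
--                     start = i + 1
--             parts.append(params[start:])
--             for p in reversed(parts):
--                 p = p.strip()
--                 if p: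
--                     stack.append(p)
--         else:
--             result.append(cleaned)
--     return [r for r in result if r and not r.isdigit()]
-- ===== Notes on version B (the rewrite author's own statement) =====
-- stated objective: alternative
-- what changed: Replaces the recursive pre-order descent with an explicit worklist loop (stack of sub-types still to process, params split by index slicing and pushed in reverse), with the empty/digit filter applied once at the end instead of at every recursion level.
import Mathlib
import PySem

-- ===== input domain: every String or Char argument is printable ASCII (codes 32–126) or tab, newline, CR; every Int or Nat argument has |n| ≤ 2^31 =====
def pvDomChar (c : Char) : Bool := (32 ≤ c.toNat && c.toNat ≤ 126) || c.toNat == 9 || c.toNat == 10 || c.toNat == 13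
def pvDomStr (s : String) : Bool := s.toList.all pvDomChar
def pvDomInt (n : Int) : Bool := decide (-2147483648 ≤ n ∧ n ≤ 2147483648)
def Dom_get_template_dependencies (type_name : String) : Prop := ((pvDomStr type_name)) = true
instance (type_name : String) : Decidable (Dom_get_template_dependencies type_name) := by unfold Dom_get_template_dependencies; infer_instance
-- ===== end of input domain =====

-- B replaces A's recursion by an explicit worklist stack and one final filter (objective: alternative, same cost).
-- Both ports work on List Char; fuel bounds the recursion/loop depth and is always sufficient (each sub-type is
-- strictly shorter than its parent), so the ports are exact on every input.

-- ===== PORT A =====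
-- clean_type_name, shared module helper (A and B call it unchanged)
def cleanChars (s : List Char) : List Char :=
  let r0 := s
  let r1 := if PySem.Chars.endswith r0 "const *".toList then
              PySem.List.slice r0 none (some (-7)) ++ ['*'] else r0
  let r2 := if PySem.Chars.startswith r1 "const ".toList then
              PySem.List.slice r1 (some 6) none else r1
  let r3 := if r2 ≠ [] ∧ (PySem.List.pyGet? r2 (-1) = some '&' ∨ PySem.List.pyGet? r2 (-1) = some '*') then
              (if r2.length > 1 then PySem.List.slice r2 none (some (-2)) else PySem.List.slice r2 none (some (-1)))
            else r2
  PySem.Chars.strip r3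

-- the final list comprehension's predicate: r and not r.isdigit()
def predKeep (r : List Char) : Bool := (!r.isEmpty) && !PySem.Chars.strIsdigit r

-- A's inner `for c in params` loop; state = (depth, current_param, result), g = the recursive call
def loopA (g : List Char → List (List Char)) :
    List Char → Int → List Char → List (List Char) → List Char × List (List Char)
  | [], _, cur, res => (cur, res)
  | c :: cs, d, cur, res =>
    if c = '<' then loopA g cs (d + 1) (cur ++ [c]) res
    else if c = '>' then loopA g cs (d - 1) (cur ++ [c]) res
    else if c = ',' ∧ d = 0 then
      let p := PySem.Chars.strip cur
      loopA g cs d [] (if p ≠ [] then res ++ g p else res)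
    else loopA g cs d (cur ++ [c]) res

-- A's recursion, fueled (each recursive argument is strictly shorter, so fuel = length+1 always suffices)
def dfsA : Nat → List Char → List (List Char)
  | 0, _ => []
  | f + 1, s =>
    let cleaned := cleanChars s
    let result :=
      if PySem.Chars.isIn ['<'] cleaned ∧ PySem.Chars.endswith cleaned ['>'] then
        -- cleaned.split('<', 1): exact here since '<' occurs in cleaned
        let base := cleaned.takeWhile (· ≠ '<')
        let params := PySem.List.slice ((cleaned.dropWhile (· ≠ '<')).drop 1) none (some (-1))
        let pr := loopA (dfsA f) params 0 [] [PySem.Chars.strip base]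
        if pr.1 ≠ [] then
          let p := PySem.Chars.strip pr.1
          if p ≠ [] then pr.2 ++ dfsA f p else pr.2
        else pr.2
      else [cleaned]
    result.filter predKeep

def get_template_dependencies (type_name : String) : List String :=
  (dfsA (type_name.toList.length + 1) type_name.toList).map String.ofList

-- ===== PORT B =====
-- B's `for i, c in enumerate(params)` index scan collecting parts (the trailing params[start:] folded into the base case)
def scanB (params : List Char) :
    List (Int × Char) → Int → Int → List (List Char) → List (List Char)
  | [], _, st, parts => parts ++ [PySem.List.slice params (some st) none]
  | (i, c) :: rest, d, st, parts =>
    if c = '<' then scanB params rest (d + 1) st parts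
    else if c = '>' then scanB params rest (d - 1) st parts
    else if c = ',' ∧ d = 0 then
      scanB params rest d (i + 1) (parts ++ [PySem.List.slice params (some st) (some i)])
    else scanB params rest d st parts

-- B's `while stack` loop; the Lean list's head is the top of the Python stack (stack.pop() = head,
-- appending reversed(parts) = consing the stripped parts in order), fueled by the number of pops
def loopB : Nat → List (List Char) → List (List Char) → List (List Char)
  | _, [], acc => acc
  | 0, _ :: _, acc => acc
  | f + 1, s :: stack, acc =>
    let cleaned := cleanChars s
    if PySem.Chars.isIn ['<'] cleaned ∧ PySem.Chars.endswith cleaned ['>'] then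
      let base := cleaned.takeWhile (· ≠ '<')
      let params := PySem.List.slice ((cleaned.dropWhile (· ≠ '<')).drop 1) none (some (-1))
      let parts := scanB params (PySem.List.enumerate params 0) 0 0 []
      let stack' := parts.reverse.foldl
        (fun st p => let q := PySem.Chars.strip p; if q ≠ [] then q :: st else st) stack
      loopB f stack' (acc ++ [PySem.Chars.strip base])
    else loopB f stack (acc ++ [cleaned])

def get_template_dependencies_alt (type_name : String) : List String :=
  ((loopB (type_name.toList.length + 1) [type_name.toList] []).filter predKeep).map String.ofList

-- ===== PRECONDITION & SPEC =====
def Spec_get_template_dependencies (type_name : String) (out : List String) : Prop := out = get_template_dependencies_alt type_name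
instance (type_name : String) (out : List String) : Decidable (Spec_get_template_dependencies type_name out) := by unfold Spec_get_template_dependencies; infer_instance

-- ===== CLAIM (what is proved, stated in full; the proofs are below) =====
def Claim_equal_get_template_dependencies : Prop := ∀ (type_name : String), Dom_get_template_dependencies type_name → Spec_get_template_dependencies type_name (get_template_dependencies type_name)

-- ===== LEMMAS AND PROOFS =====

-- proof-side view: the raw top-level comma chunks of a parameter string
def chunks : List Char → Int → List Char → List (List Char)
  | [], _, cur => [cur]
  | c :: cs, d, cur =>
    if c = '<' then chunks cs (d + 1) (cur ++ [c])
    else if c = '>' then chunks cs (d - 1) (cur ++ [c])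
    else if c = ',' ∧ d = 0 then cur :: chunks cs d []
    else chunks cs d (cur ++ [c])

-- proof-side view: the unfiltered pre-order emission list both programs produce
def pre : Nat → List Char → List (List Char)
  | 0, _ => []
  | f + 1, s =>
    let cleaned := cleanChars s
    if PySem.Chars.isIn ['<'] cleaned ∧ PySem.Chars.endswith cleaned ['>'] then
      PySem.Chars.strip (cleaned.takeWhile (· ≠ '<')) ::
        (chunks (PySem.List.slice ((cleaned.dropWhile (· ≠ '<')).drop 1) none (some (-1))) 0 []).flatMap
          (fun ch => let p := PySem.Chars.strip ch; if p ≠ [] then pre f p else [])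
    else [cleaned]

-- A's flush of the last pending parameter, as applied to the loop's final state
def flushA (g : List Char → List (List Char)) (pr : List Char × List (List Char)) :
    List (List Char) :=
  if pr.1 ≠ [] then
    if PySem.Chars.strip pr.1 ≠ [] then pr.2 ++ g (PySem.Chars.strip pr.1) else pr.2
  else pr.2

-- the body of the per-chunk handling both sides share
def chunkGo (g : List Char → List (List Char)) (ch : List Char) : List (List Char) :=
  if PySem.Chars.strip ch ≠ [] then g (PySem.Chars.strip ch) else []

theorem sum_len_chunks (cs : List Char) : ∀ (d : Int) (cur : List Char),
    ((chunks cs d cur).map List.length).sum ≤ cur.length + cs.length := by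
  induction cs with
  | nil => intro d cur; simp [chunks]
  | cons c cs ih =>
    intro d cur
    simp only [chunks]
    split_ifs with h1 h2 h3
    · have := ih (d + 1) (cur ++ [c])
      simp only [List.length_append, List.length_cons, List.length_nil] at this ⊢; omega
    · have := ih (d - 1) (cur ++ [c])
      simp only [List.length_append, List.length_cons, List.length_nil] at this ⊢; omega
    · have := ih d []
      simp only [List.map_cons, List.sum_cons, List.length_nil, List.length_cons] at this ⊢; omega
    · have := ih d (cur ++ [c])
      simp only [List.length_append, List.length_cons, List.length_nil] at this ⊢; omega

theorem len_of_mem_chunks {ch : List Char} {cs : List Char} {d : Int} {cur : List Char}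
    (h : ch ∈ chunks cs d cur) : ch.length ≤ cur.length + cs.length :=
  le_trans (List.le_sum_of_mem (List.mem_map_of_mem h)) (sum_len_chunks cs d cur)

theorem length_strip_le (cs : List Char) : (PySem.Chars.strip cs).length ≤ cs.length := by
  unfold PySem.Chars.strip PySem.Chars.rstrip PySem.Chars.lstrip
  simp only [List.length_reverse]
  exact le_trans (List.length_dropWhile_le _ _)
    (by simpa using List.length_dropWhile_le (fun c => PySem.Chars.isspace c) cs)

theorem clean_step1_le (r : List Char) :
    (if PySem.Chars.endswith r "const *".toList then
        PySem.List.slice r none (some (-7)) ++ ['*'] else r).length ≤ r.length := by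
  split_ifs with h
  · have hs : ("const *".toList) <:+ r := (PySem.Chars.endswith_iff _ _).1 h
    have h7 : 7 ≤ r.length := by simpa using hs.length_le
    rw [PySem.List.slice_to_neg_ofNat r 7 (by omega)]
    simp only [List.length_append, List.length_take, List.length_cons, List.length_nil]
    omega
  · exact le_refl _

theorem clean_step2_le (r : List Char) :
    (if PySem.Chars.startswith r "const ".toList then
        PySem.List.slice r (some 6) none else r).length ≤ r.length := by
  split_ifs with h
  · rw [PySem.List.slice_from r (by norm_num)]
    simp
  · exact le_refl _

theorem clean_step3_le (r : List Char) :
    (if r ≠ [] ∧ (PySem.List.pyGet? r (-1) = some '&' ∨ PySem.List.pyGet? r (-1) = some '*') then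
        (if r.length > 1 then PySem.List.slice r none (some (-2))
         else PySem.List.slice r none (some (-1)))
      else r).length ≤ r.length := by
  split_ifs with h1 h2
  · rw [PySem.List.slice_to_neg_ofNat r 2 (by omega)]
    simp only [List.length_take]
    omega
  · rw [PySem.List.slice_to_neg_one]
    have := List.length_dropLast (xs := r)
    omega
  · exact le_refl _

theorem length_clean_le (s : List Char) : (cleanChars s).length ≤ s.length := by
  unfold cleanChars
  exact le_trans (length_strip_le _)
    (le_trans (clean_step3_le _) (le_trans (clean_step2_le _) (clean_step1_le _)))

-- the split facts under the template condition
theorem split_shape {cl : List Char}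
    (h : PySem.Chars.isIn ['<'] cl = true ∧ PySem.Chars.endswith cl ['>'] = true) :
    (PySem.List.slice ((cl.dropWhile (· ≠ '<')).drop 1) none (some (-1))).length + 2 ≤ cl.length := by
  obtain ⟨h1, h2⟩ := h
  have hmem : '<' ∈ cl := by
    have := (PySem.Chars.isIn_iff_infix _ _).1 h1
    exact this.sublist.subset (List.mem_singleton_self _)
  have hd : cl.dropWhile (· ≠ '<') ≠ [] := by
    intro he
    have := List.dropWhile_eq_nil_iff.1 he '<' hmem
    simp at this
  obtain ⟨x, xs, hx⟩ := List.exists_cons_of_ne_nil hd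
  have hhead : x = '<' := by
    have := List.head_dropWhile_not (fun c => decide (c ≠ '<')) hd
    simp only [hx, List.head_cons] at this
    simpa using this
  have hxs : (cl.dropWhile (· ≠ '<')).drop 1 = xs := by rw [hx, List.drop_one, List.tail_cons]
  have hsplit : cl.takeWhile (· ≠ '<') ++ ('<' :: xs) = cl := by
    have h0 : cl.takeWhile (· ≠ '<') ++ (x :: xs) = cl := by
      rw [← hx]; exact List.takeWhile_append_dropWhile
    rw [hhead] at h0; exact h0
  have hne : xs ≠ [] := by
    intro he
    rw [he] at hsplit
    have hsuf : ['>'] <:+ cl := (PySem.Chars.endswith_iff _ _).1 h2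
    obtain ⟨t, ht⟩ := hsuf
    rw [← hsplit] at ht
    have : '<' = '>' := by
      have h' := congrArg List.getLast? ht
      simp at h'
    simp at this
  rw [hxs, PySem.List.slice_to_neg_one]
  have hlen := congrArg List.length hsplit
  simp only [List.length_append, List.length_cons] at hlen
  have hdl := List.length_dropLast (xs := xs)
  have hpos : 1 ≤ xs.length := List.length_pos_iff.2 hne
  omega

theorem loopA_flush (g : List Char → List (List Char)) (cs : List Char) : ∀ (d : Int)
    (cur : List Char) (res : List (List Char)),
    flushA g (loopA g cs d cur res)
      = res ++ (chunks cs d cur).flatMap (chunkGo g) := by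
  induction cs with
  | nil =>
    intro d cur res
    simp only [loopA, chunks, List.flatMap_cons, List.flatMap_nil, List.append_nil,
      flushA, chunkGo]
    by_cases hc : cur = []
    · subst hc; simp [PySem.Chars.strip, PySem.Chars.lstrip, PySem.Chars.rstrip]
    · simp only [hc, ne_eq, not_false_eq_true, if_true]
      by_cases hp : PySem.Chars.strip cur = [] <;> simp [hp]
  | cons c cs ih =>
    intro d cur res
    simp only [loopA, chunks]
    split_ifs with h1 h2 h3 hp
    · exact ih (d + 1) (cur ++ [c]) res
    · exact ih (d - 1) (cur ++ [c]) res
    · rw [ih d []]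
      simp [chunkGo, hp, List.flatMap_cons, List.append_assoc]
    · rw [ih d []]
      simp [chunkGo, hp, List.flatMap_cons]
    · exact ih d (cur ++ [c]) res

set_option maxHeartbeats 2000000 in
theorem dfsA_eq_filter_pre (f : Nat) : ∀ (s : List Char),
    dfsA f s = (pre f s).filter predKeep := by
  induction f with
  | zero => intro s; simp [dfsA, pre]
  | succ f ih =>
    intro s
    simp only [dfsA, pre]
    by_cases hc : PySem.Chars.isIn ['<'] (cleanChars s) = true ∧
        PySem.Chars.endswith (cleanChars s) ['>'] = true
    · rw [if_pos hc, if_pos hc]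
      have hloop := loopA_flush (dfsA f)
        (PySem.List.slice (((cleanChars s).dropWhile (· ≠ '<')).drop 1) none (some (-1)))
        0 [] [PySem.Chars.strip ((cleanChars s).takeWhile (· ≠ '<'))]
      unfold flushA at hloop
      rw [hloop]
      have hgo : ∀ ch, chunkGo (dfsA f) ch
          = (chunkGo (pre f) ch).filter predKeep := by
        intro ch
        unfold chunkGo
        by_cases hp : PySem.Chars.strip ch = [] <;> simp [hp, ih]
      have hflat : ((chunks (PySem.List.slice (((cleanChars s).dropWhile (· ≠ '<')).drop 1)
            none (some (-1))) 0 []).flatMap (chunkGo (dfsA f)))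
          = ((chunks (PySem.List.slice (((cleanChars s).dropWhile (· ≠ '<')).drop 1)
            none (some (-1))) 0 []).flatMap (chunkGo (pre f))).filter predKeep := by
        rw [List.filter_flatMap]
        exact congrArg (fun g => List.flatMap g (chunks (PySem.List.slice
          (((cleanChars s).dropWhile (· ≠ '<')).drop 1) none (some (-1))) 0 []))
          (funext fun ch => hgo ch)
      rw [hflat, List.filter_append, List.filter_filter]
      have : (fun a => predKeep a && predKeep a) = predKeep := by
        funext a; rw [Bool.and_self]
      rw [this, ← List.filter_append]
      rfl
    · rw [if_neg hc, if_neg hc]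

theorem pre_stable (n : Nat) : ∀ (s : List Char) (f g : Nat), s.length ≤ n →
    s.length < f → s.length < g → pre f s = pre g s := by
  induction n with
  | zero =>
    intro s f g hn hf hg
    obtain ⟨f', rfl⟩ : ∃ f', f = f' + 1 := ⟨f - 1, by omega⟩
    obtain ⟨g', rfl⟩ : ∃ g', g = g' + 1 := ⟨g - 1, by omega⟩
    simp only [pre]
    by_cases hc : PySem.Chars.isIn ['<'] (cleanChars s) = true ∧
        PySem.Chars.endswith (cleanChars s) ['>'] = true
    · exfalso
      have := split_shape hc
      have := length_clean_le s
      omega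
    · simp [hc]
  | succ n ih =>
    intro s f g hn hf hg
    obtain ⟨f', rfl⟩ : ∃ f', f = f' + 1 := ⟨f - 1, by omega⟩
    obtain ⟨g', rfl⟩ : ∃ g', g = g' + 1 := ⟨g - 1, by omega⟩
    simp only [pre]
    by_cases hc : PySem.Chars.isIn ['<'] (cleanChars s) = true ∧
        PySem.Chars.endswith (cleanChars s) ['>'] = true
    · simp only [hc, and_self, if_true]
      have hsz := split_shape hc
      have hcl := length_clean_le s
      refine congrArg _ ?_
      rw [List.flatMap_def, List.flatMap_def]
      refine congrArg _ (List.map_congr_left fun ch hch => ?_)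
      have hch' : ch.length ≤ (PySem.List.slice (((cleanChars s).dropWhile (· ≠ '<')).drop 1)
          none (some (-1))).length := by simpa using len_of_mem_chunks hch
      by_cases hp : PySem.Chars.strip ch = []
      · simp [hp]
      · simp only [hp, ne_eq, not_false_eq_true, if_true]
        have hlp := length_strip_le ch
        exact ih (PySem.Chars.strip ch) f' g' (by omega) (by omega) (by omega)
    · simp [hc]

theorem scanB_chunks (params : List Char) : ∀ (suffix : List Char) (j st : Nat)
    (d : Int) (parts : List (List Char)), params.drop j = suffix → st ≤ j →
    scanB params (PySem.List.enumerate suffix (j : Int)) d (st : Int) parts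
      = parts ++ chunks suffix d ((params.drop st).take (j - st)) := by
  intro suffix
  induction suffix with
  | nil =>
    intro j st d parts hj hst
    simp only [PySem.List.enumerate, scanB, chunks]
    rw [PySem.List.slice_from_natCast]
    have hlen : params.length ≤ j := List.drop_eq_nil_iff.1 hj
    have : (params.drop st).length ≤ j - st := by
      simp only [List.length_drop]; omega
    rw [List.take_of_length_le this]
  | cons c cs ih =>
    intro j st d parts hj hst
    have hlt : j < params.length := by
      by_contra hge
      rw [List.drop_eq_nil_iff.2 (by omega)] at hj
      simp at hj
    have h' := List.drop_eq_getElem_cons hlt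
    rw [hj] at h'
    obtain ⟨he1, he2⟩ := List.cons_eq_cons.1 h'.symm
    have hgrow : ∀ st', st' ≤ j →
        (params.drop st').take (j + 1 - st') = (params.drop st').take (j - st') ++ [c] := by
      intro st' hst'
      have hidx : j - st' < (params.drop st').length := by
        simp only [List.length_drop]; omega
      have hs1 : j + 1 - st' = (j - st') + 1 := by omega
      rw [hs1, List.take_add_one, List.getElem?_eq_getElem hidx]
      simp [List.getElem_drop, Nat.add_sub_cancel' hst', he1]
    rw [PySem.List.enumerate_cons]
    simp only [scanB, chunks]
    split_ifs with h1 h2 h3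
    · have := ih (j + 1) st (d + 1) parts he2 (by omega)
      push_cast at this ⊢
      rw [this, hgrow st hst]
    · have := ih (j + 1) st (d - 1) parts he2 (by omega)
      push_cast at this ⊢
      rw [this, hgrow st hst]
    · have := ih (j + 1) (j + 1) d
        (parts ++ [PySem.List.slice params (some (st : Int)) (some (j : Int))]) he2 (le_refl _)
      push_cast at this ⊢
      rw [this, PySem.List.slice_natCast]
      simp [List.append_assoc]
    · have := ih (j + 1) st d parts he2 (by omega)
      push_cast at this ⊢
      rw [this, hgrow st hst]

theorem foldl_push (parts : List (List Char)) : ∀ (stack : List (List Char)),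
    parts.reverse.foldl (fun st p => let q := PySem.Chars.strip p; if q ≠ [] then q :: st else st) stack
      = ((parts.map PySem.Chars.strip).filter (fun x => x ≠ [])) ++ stack := by
  induction parts with
  | nil => intro stack; simp
  | cons a t ih =>
    intro stack
    simp only [List.reverse_cons, List.foldl_append, ih, List.foldl_cons, List.foldl_nil,
      List.map_cons, List.filter_cons]
    by_cases hp : PySem.Chars.strip a = [] <;> simp [hp]

theorem sum_push_le (l : List (List Char)) :
    ((((l.map PySem.Chars.strip).filter (fun x => x ≠ [])).map (fun s => max s.length 1)).sum)
      ≤ (l.map List.length).sum := by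
  induction l with
  | nil => simp
  | cons a t ih =>
    simp only [ne_eq] at ih ⊢
    by_cases hp : PySem.Chars.strip a = []
    · simp only [List.map_cons, List.filter_cons, List.sum_cons, hp, not_true_eq_false,
        decide_false, Bool.false_eq_true, if_false]
      omega
    · have h1 : 1 ≤ (PySem.Chars.strip a).length := List.length_pos_iff.2 hp
      have h2 := length_strip_le a
      simp only [List.map_cons, List.filter_cons, List.sum_cons, hp, not_false_eq_true,
        decide_true, if_true, List.map_cons, List.sum_cons]
      omega

theorem flatMap_filter_strip (l : List (List Char)) (h : List Char → List (List Char)) :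
    ((l.map PySem.Chars.strip).filter (fun x => x ≠ [])).flatMap h
      = l.flatMap (fun ch => if PySem.Chars.strip ch ≠ [] then h (PySem.Chars.strip ch) else []) := by
  induction l with
  | nil => simp
  | cons a t ih =>
    simp only [List.map_cons, List.filter_cons, List.flatMap_cons]
    by_cases hp : PySem.Chars.strip a = []
    · simp only [hp, ne_eq, not_true_eq_false, decide_false, Bool.false_eq_true, if_false, ih]
      simp
    · simp only [hp, ne_eq, not_false_eq_true, decide_true, if_true, List.flatMap_cons, ih]

theorem loopB_main (f : Nat) : ∀ (stack acc : List (List Char)),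
    (stack.map (fun s => max s.length 1)).sum ≤ f →
    loopB f stack acc = acc ++ stack.flatMap (fun s => pre (s.length + 1) s) := by
  induction f using Nat.strong_induction_on with
  | _ f ihf =>
    intro stack acc h
    match stack with
    | [] => cases f <;> simp [loopB]
    | s :: rest =>
      have hone : 1 ≤ (List.map (fun s => max s.length 1) (s :: rest)).sum := by
        simp only [List.map_cons, List.sum_cons]; omega
      obtain ⟨f', rfl⟩ : ∃ f', f = f' + 1 := ⟨f - 1, by omega⟩
      simp only [List.map_cons, List.sum_cons] at h
      simp only [loopB]
      by_cases hc : PySem.Chars.isIn ['<'] (cleanChars s) = true ∧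
          PySem.Chars.endswith (cleanChars s) ['>'] = true
      · simp only [hc, and_self, if_true]
        have hsz := split_shape hc
        have hcl := length_clean_le s
        have hparts : scanB (PySem.List.slice (((cleanChars s).dropWhile (· ≠ '<')).drop 1) none (some (-1)))
            (PySem.List.enumerate (PySem.List.slice (((cleanChars s).dropWhile (· ≠ '<')).drop 1) none (some (-1))) 0) 0 0 []
            = chunks (PySem.List.slice (((cleanChars s).dropWhile (· ≠ '<')).drop 1) none (some (-1))) 0 [] := by
          have := scanB_chunks (PySem.List.slice (((cleanChars s).dropWhile (· ≠ '<')).drop 1) none (some (-1)))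
            (PySem.List.slice (((cleanChars s).dropWhile (· ≠ '<')).drop 1) none (some (-1)))
            0 0 0 [] (by simp) (le_refl _)
          simpa using this
        rw [hparts, foldl_push]
        set params := PySem.List.slice (((cleanChars s).dropWhile (· ≠ '<')).drop 1) none (some (-1)) with hpdef
        set filt := ((chunks params 0 []).map PySem.Chars.strip).filter (fun x => x ≠ []) with hfdef
        have hsum : (filt.map (fun s => max s.length 1)).sum ≤ params.length := by
          rw [hfdef]
          have := le_trans (sum_push_le (chunks params 0 [])) (sum_len_chunks params 0 [])
          simpa using this
        have hbound : ((filt ++ rest).map (fun s => max s.length 1)).sum ≤ f' := by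
          rw [List.map_append, List.sum_append]
          omega
        rw [ihf f' (by omega) (filt ++ rest) _ hbound]
        have hpre : pre (s.length + 1) s
            = PySem.Chars.strip ((cleanChars s).takeWhile (· ≠ '<')) ::
              (chunks params 0 []).flatMap
                (fun ch => if PySem.Chars.strip ch ≠ [] then pre s.length (PySem.Chars.strip ch) else []) := by
          obtain ⟨m, hm⟩ : ∃ m, s.length = m + 1 := ⟨s.length - 1, by omega⟩
          rw [hm]
          simp only [pre, hc, and_self, if_true, ← hpdef]
        have hflt : filt.flatMap (fun p => pre (p.length + 1) p)
            = (chunks params 0 []).flatMap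
                (fun ch => if PySem.Chars.strip ch ≠ [] then pre s.length (PySem.Chars.strip ch) else []) := by
          rw [hfdef, flatMap_filter_strip]
          rw [List.flatMap_def, List.flatMap_def]
          refine congrArg _ (List.map_congr_left fun ch hch => ?_)
          by_cases hp : PySem.Chars.strip ch = []
          · simp [hp]
          · simp only [hp, ne_eq, not_false_eq_true, if_true]
            have hch' : ch.length ≤ params.length := by simpa using len_of_mem_chunks hch
            have hlp := length_strip_le ch
            exact pre_stable (PySem.Chars.strip ch).length (PySem.Chars.strip ch)
              ((PySem.Chars.strip ch).length + 1) s.length (le_refl _) (by omega) (by omega)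
        rw [List.flatMap_append, hflt, List.flatMap_cons, hpre]
        simp [List.append_assoc]
      · simp only [hc, if_false]
        have hbound : (rest.map (fun s => max s.length 1)).sum ≤ f' := by omega
        rw [ihf f' (by omega) rest _ hbound]
        have hpre : pre (s.length + 1) s = [cleanChars s] := by
          simp only [pre, hc, if_false]
        rw [List.flatMap_cons, hpre]
        simp [List.append_assoc]

-- ===== VERDICT (by name: the statement is the Claim_ definition above) =====
theorem get_template_dependencies_spec : Claim_equal_get_template_dependencies := by
  intro s _
  unfold Spec_get_template_dependencies get_template_dependencies get_template_dependencies_alt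
  rw [dfsA_eq_filter_pre, loopB_main]
  · simp
  · simp
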